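-- pv_equiv track=rewrite | github.com/nguyenduchuyiu/BetaZero | betazero/search/sorrifier.py | _clean_redundant_sorries
-- ===== SOURCE A (Python) =====
-- from typing import Tuple, List, Dict, TextIO, Optional
--
-- def _clean_redundant_sorries(lines: List[str]) -> str:
--     cleaned = []
--     for line in lines:
--         if line == "": continue
--         stripped = line.strip()
--         if stripped == "sorry" and cleaned and cleaned[-1].strip() == "sorry": continue
--         cleaned.append(line)
--     return "\n".join(cleaned) + "\n"
-- ===== SOURCE B (Python) =====
-- from itertools import groupby
--
-- def _clean_redundant_sorries(lines):
--     nonblank = [line for line in lines if line != ""]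
--     result = []
--     for is_sorry, group in groupby(nonblank, key=lambda l: l.strip() == "sorry"):
--         if is_sorry:
--             result.append(next(group))
--         else:
--             result.extend(group)
--     return "\n".join(result) + "\n"
-- ===== Notes on version B (the rewrite author's own statement) =====
-- stated objective: idiomatic
-- what changed: Replaces the single look-back-at-the-last-kept-line loop with a blank-line filter pass followed by itertools.groupby run-grouping that keeps only the first line of each sorry-run.
import Mathlib
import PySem

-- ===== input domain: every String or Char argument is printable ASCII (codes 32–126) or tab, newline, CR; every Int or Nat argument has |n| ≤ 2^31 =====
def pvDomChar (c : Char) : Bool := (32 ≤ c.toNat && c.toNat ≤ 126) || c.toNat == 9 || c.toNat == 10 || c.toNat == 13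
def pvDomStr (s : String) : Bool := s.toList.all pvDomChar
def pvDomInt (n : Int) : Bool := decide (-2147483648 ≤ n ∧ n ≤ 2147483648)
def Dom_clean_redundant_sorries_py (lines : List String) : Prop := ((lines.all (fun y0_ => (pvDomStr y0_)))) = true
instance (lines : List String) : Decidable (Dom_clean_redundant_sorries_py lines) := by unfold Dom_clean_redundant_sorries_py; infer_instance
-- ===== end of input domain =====

-- B replaces A's look-back-at-the-last-kept-line loop by a blank-line filter pass plus
-- run-grouping (itertools.groupby) that keeps the first line of each sorry-run; same result.

-- ===== PORT A =====
-- one step of A's loop: skip "", skip a sorry line after a kept sorry line, else append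
def pvStepA (cleaned : List String) (line : String) : List String :=
  if line == "" then cleaned
  else
    let stripped := PySem.Str.strip line
    if stripped == "sorry" &&
       (match cleaned.getLast? with
        | some l => PySem.Str.strip l == "sorry"
        | none => false) then cleaned
    else cleaned ++ [line]

def clean_redundant_sorries_py (lines : List String) : String :=
  PySem.Str.join "\n" (lines.foldl pvStepA []) ++ "\n"

-- ===== PORT B =====
def pvIsSorry (l : String) : Bool := PySem.Str.strip l == "sorry"

-- groupby over runs of the key pvIsSorry: keep the whole run unless it is a sorry-run,
-- of which only the first element is kept
def pvCollapse : List String → List String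
  | [] => []
  | x :: xs =>
    if pvIsSorry x then x :: pvCollapse (xs.dropWhile pvIsSorry)
    else x :: pvCollapse xs
termination_by l => l.length
decreasing_by
  · simpa using Nat.lt_succ_of_le (xs.length_dropWhile_le pvIsSorry)
  · simp

def clean_redundant_sorries_py_alt (lines : List String) : String :=
  PySem.Str.join "\n" (pvCollapse (lines.filter (fun l => l != ""))) ++ "\n"

-- ===== PRECONDITION & SPEC =====
def Spec_clean_redundant_sorries_py (lines : List String) (out : String) : Prop := out = clean_redundant_sorries_py_alt lines
instance (lines : List String) (out : String) : Decidable (Spec_clean_redundant_sorries_py lines out) := by unfold Spec_clean_redundant_sorries_py; infer_instance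

-- ===== CLAIM (what is proved, stated in full; the proofs are below) =====
def Claim_equal_clean_redundant_sorries_py : Prop := ∀ (lines : List String), Dom_clean_redundant_sorries_py lines → Spec_clean_redundant_sorries_py lines (clean_redundant_sorries_py lines)

-- ===== LEMMAS AND PROOFS =====

-- whether the last kept line is a sorry line
def pvLastS (acc : List String) : Bool :=
  match acc.getLast? with
  | some l => pvIsSorry l
  | none => false

-- what A's loop appends after state acc, as a function of pvLastS acc only
def pvG (b : Bool) : List String → List String
  | [] => []
  | x :: xs =>
    if x == "" then pvG b xs
    else if pvIsSorry x then (if b then pvG true xs else x :: pvG true xs)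
    else x :: pvG false xs

lemma pvFoldA (xs : List String) : ∀ (acc : List String),
    xs.foldl pvStepA acc = acc ++ pvG (pvLastS acc) xs := by
  induction xs with
  | nil => intro acc; simp [pvG]
  | cons x xs ih =>
    intro acc
    by_cases hx : x = ""
    · simp [hx, pvStepA, pvG, ih]
    · by_cases hs : pvIsSorry x
      · by_cases hb : pvLastS acc
        · have hstep : pvStepA acc x = acc := by
            simp only [pvStepA, pvLastS, pvIsSorry] at *
            simp [hx, hs, hb]
          simp [List.foldl_cons, hstep, ih, pvG, hx, hs, hb]
        · have hstep : pvStepA acc x = acc ++ [x] := by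
            simp only [pvStepA, pvLastS, pvIsSorry] at *
            simp [hx]
            intro _; simpa using hb
          have hlast : pvLastS (acc ++ [x]) = pvIsSorry x := by
            simp [pvLastS]
          simp [List.foldl_cons, hstep, ih, pvG, hx, hs, hb, hlast]
      · have hstep : pvStepA acc x = acc ++ [x] := by
          simp only [pvStepA, pvIsSorry] at *
          simp [hx, hs]
        have hlast : pvLastS (acc ++ [x]) = pvIsSorry x := by
          simp [pvLastS]
        simp [List.foldl_cons, hstep, ih, pvG, hx, hs, hlast]

lemma pvG_collapse (xs : List String) :
    pvG false xs = pvCollapse (xs.filter (fun l => l != "")) ∧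
    pvG true xs = pvCollapse ((xs.filter (fun l => l != "")).dropWhile pvIsSorry) := by
  induction xs with
  | nil => simp [pvG, pvCollapse]
  | cons x xs ih =>
    by_cases hx : x = ""
    · simpa [pvG, hx] using ih
    · by_cases hs : pvIsSorry x
      · constructor
        · simp [pvG, hx, hs, pvCollapse, ih.2]
        · simp [pvG, hx, hs, ih.2]
      · constructor
        · simp [pvG, hx, hs, pvCollapse, ih.1]
        · simp [pvG, hx, hs, pvCollapse, ih.1]

-- ===== VERDICT (by name: the statement is the Claim_ definition above) =====
theorem clean_redundant_sorries_py_spec : Claim_equal_clean_redundant_sorries_py := by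
  intro lines _
  show _ = _
  unfold clean_redundant_sorries_py clean_redundant_sorries_py_alt
  rw [pvFoldA lines []]
  have h : pvLastS ([] : List String) = false := rfl
  rw [h, (pvG_collapse lines).1, List.nil_append]
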